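-- pv_equiv track=rewrite | github.com/celinanperalta/HackRU20192 | SpotifyController.py | get_artist_list_features
-- ===== SOURCE A (Python) =====
-- GENRES = ["jazz", "rock", "indie", "classical", "pop", "soul", "latin", "hip hop", "rap", "folk", "acoustic", "metal", "funk", "electronic"]
--
-- def get_artist_list_features(artists):
--     genres = {}
--     for x in GENRES:
--         genres[x] = 0
--
--     for x in artists:
--         for g in x['genres']:
--             temp = list(filter(lambda x: x in g, GENRES))
--             for g in temp:
--                 genres[g] += 1
--     return genres.items()
-- ===== SOURCE B (Python) =====
-- GENRES = ["jazz", "rock", "indie", "classical", "pop", "soul", "latin", "hip hop", "rap", "folk", "acoustic", "metal", "funk", "electronic"]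
--
-- def get_artist_list_features(artists):
--     artists = list(artists)
--     counts = {kw: sum(1 for x in artists for g in x['genres'] if kw in g)
--               for kw in GENRES}
--     return counts.items()
-- ===== Notes on version B (the rewrite author's own statement) =====
-- stated objective: alternative
-- what changed: Inverts the loop nesting: instead of one pass over artists mutating a seeded accumulator dict, B computes each keyword's count independently with a dict comprehension over GENRES summing substring matches over all genre strings.
import Mathlib
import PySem

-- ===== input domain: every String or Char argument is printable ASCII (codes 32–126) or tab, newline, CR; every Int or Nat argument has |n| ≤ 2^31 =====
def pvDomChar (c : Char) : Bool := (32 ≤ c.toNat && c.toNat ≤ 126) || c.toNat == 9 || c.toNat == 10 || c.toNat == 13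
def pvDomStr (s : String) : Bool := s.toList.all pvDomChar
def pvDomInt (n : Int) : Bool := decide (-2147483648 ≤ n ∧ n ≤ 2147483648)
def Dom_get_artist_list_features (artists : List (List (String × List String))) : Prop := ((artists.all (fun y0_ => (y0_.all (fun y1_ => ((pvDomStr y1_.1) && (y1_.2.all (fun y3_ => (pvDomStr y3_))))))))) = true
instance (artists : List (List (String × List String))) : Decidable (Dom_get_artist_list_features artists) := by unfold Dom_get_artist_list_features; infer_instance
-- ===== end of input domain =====

-- B inverts the loop nesting: one independent substring-count per keyword (map over GENRES) instead of A's single accumulating pass over artists into a seeded dict; same cost, different decomposition.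

def pvGENRES : List String := ["jazz", "rock", "indie", "classical", "pop", "soul", "latin", "hip hop", "rap", "folk", "acoustic", "metal", "funk", "electronic"]

-- ===== PORT A =====
def get_artist_list_features (artists : List (List (String × List String))) : List (String × Int) :=
  -- genres = {}; for x in GENRES: genres[x] = 0
  let seed : PySem.Dict String Int := pvGENRES.foldl (fun d x => d.insert x 0) PySem.Dict.empty
  -- for x in artists: for g in x['genres']: temp = filter(...); for g in temp: genres[g] += 1
  let final : PySem.Dict String Int := artists.foldl
    (fun d x =>
      ((PySem.Dict.mk x).getD "genres" []).foldl
        (fun d g =>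
          (pvGENRES.filter (fun kw => PySem.Str.isIn kw g)).foldl
            (fun d kw => d.modify kw 0 (· + 1)) d)
        d)
    seed
  final.items

-- ===== PORT B =====
def get_artist_list_features_alt (artists : List (List (String × List String))) : List (String × Int) :=
  pvGENRES.map (fun kw =>
    (kw, ((artists.flatMap (fun x => (PySem.Dict.mk x).getD "genres" [])).countP
            (fun g => PySem.Str.isIn kw g) : Int)))

-- ===== PRECONDITION & SPEC =====
-- Python A (and B) raises KeyError on x['genres'] when an artist dict lacks the key; exactly those inputs are excluded.
def Pre_get_artist_list_features (artists : List (List (String × List String))) : Prop :=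
  ∀ x ∈ artists, (PySem.Dict.mk x).contains "genres" = true
instance (artists : List (List (String × List String))) : Decidable (Pre_get_artist_list_features artists) := by unfold Pre_get_artist_list_features; infer_instance
def pvWitness_get_artist_list_features : (List (List (String × List String))) := [[("genres", ["indie rock", "jazz"])], [("name", ["x"]), ("genres", [])]]

def Spec_get_artist_list_features (artists : List (List (String × List String))) (out : List (String × Int)) : Prop := out = get_artist_list_features_alt artists
instance (artists : List (List (String × List String))) (out : List (String × Int)) : Decidable (Spec_get_artist_list_features artists out) := by unfold Spec_get_artist_list_features; infer_instance

-- ===== CLAIM (what is proved, stated in full; the proofs are below) =====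
def Claim_equal_get_artist_list_features : Prop := ∀ (artists : List (List (String × List String))), Dom_get_artist_list_features artists → Pre_get_artist_list_features artists → Spec_get_artist_list_features artists (get_artist_list_features artists)

-- ===== LEMMAS AND PROOFS =====

-- abbreviations used only by the proofs
def pvGsOf (x : List (String × List String)) : List String := (PySem.Dict.mk x).getD "genres" []
def pvMatches (g : String) : List String := pvGENRES.filter (fun kw => PySem.Str.isIn kw g)
def pvSeed : PySem.Dict String Int := pvGENRES.foldl (fun d x => d.insert x 0) PySem.Dict.empty

theorem pvSeed_items : pvSeed.items = pvGENRES.map (fun k => (k, (0 : Int))) := by decide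

theorem pvSeed_keys : pvSeed.keys = pvGENRES := by decide

theorem pvGENRES_nodup : pvGENRES.Nodup := by decide

theorem pvSeed_getD (k : String) (hk : k ∈ pvGENRES) : pvSeed.getD k 0 = 0 := by
  apply PySem.Dict.getD_of_mem_items pvSeed _ _
  · rw [pvSeed_items]
    exact List.mem_map.mpr ⟨k, hk, rfl⟩
  · rw [pvSeed_keys]; exact pvGENRES_nodup

theorem pvCount_one (k : String) (hk : k ∈ pvGENRES) : pvGENRES.count k = 1 := by
  have h1 := List.nodup_iff_count_le_one.mp pvGENRES_nodup k
  have h2 := List.count_pos_iff.mpr hk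
  omega

-- the flattened stream of matched keywords produces exactly countP many copies of k
theorem pvCount_flatten (gs : List String) (k : String) (hk : k ∈ pvGENRES) :
    ((gs.map pvMatches).flatten).count k = gs.countP (fun g => PySem.Str.isIn k g) := by
  induction gs with
  | nil => rfl
  | cons g gs ih =>
    rw [List.map_cons, List.flatten_cons, List.count_append, ih, List.countP_cons]
    by_cases h : PySem.Str.isIn k g = true
    · unfold pvMatches
      rw [List.count_filter (p := fun kw => PySem.Str.isIn kw g) h, pvCount_one k hk, if_pos h]; omega
    · have h0 : (pvMatches g).count k = 0 := by
        apply List.count_eq_zero.mpr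
        intro hmem
        exact h (List.mem_filter.mp hmem).2
      rw [h0, if_neg h]; omega

-- A's nested accumulating loops are a single modify-fold over the flattened keyword stream
theorem pvFoldA (artists : List (List (String × List String))) (d : PySem.Dict String Int) :
    artists.foldl
      (fun d x => (pvGsOf x).foldl
        (fun d g => (pvMatches g).foldl (fun d kw => d.modify kw 0 (· + 1)) d) d) d
    = ((((artists.map pvGsOf).flatten).map pvMatches).flatten).foldl
        (fun d kw => d.modify kw 0 (· + 1)) d := by
  rw [List.foldl_flatten, List.foldl_map, List.foldl_flatten, List.foldl_map]

theorem pvFinal_keys (ws : List String) (hws : ∀ w ∈ ws, w ∈ pvGENRES) :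
    (ws.foldl (fun d kw => d.modify kw 0 (· + 1)) pvSeed).keys = pvGENRES := by
  have h := PySem.Dict.keys_foldl_modify ws 0 (fun _ _ => (· + 1)) pvSeed
  rw [h, pvSeed_keys, PySem.Set.update_eq_append_filter]
  have : (PySem.Set.ofList ws).filter (fun y => !(PySem.Set.contains pvGENRES y)) = [] := by
    apply List.filter_eq_nil_iff.mpr
    intro w hw
    have hwmem : w ∈ ws := (PySem.Set.mem_ofList ws w).mp hw
    simp [PySem.Set.contains_eq_listContains, hws w hwmem]
  rw [this, List.append_nil]

theorem get_artist_list_features_spec : Claim_equal_get_artist_list_features := by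
  intro artists _ _
  unfold Spec_get_artist_list_features get_artist_list_features get_artist_list_features_alt
  show (artists.foldl
      (fun d x => (pvGsOf x).foldl
        (fun d g => (pvMatches g).foldl (fun d kw => d.modify kw 0 (· + 1)) d) d) pvSeed).items = _
  rw [pvFoldA]
  set ws := (((artists.map pvGsOf).flatten).map pvMatches).flatten with hws_def
  have hws : ∀ w ∈ ws, w ∈ pvGENRES := by
    intro w hw
    rw [hws_def] at hw
    obtain ⟨l, hl, hwl⟩ := List.mem_flatten.mp hw
    obtain ⟨g, _, rfl⟩ := List.mem_map.mp hl
    exact (List.mem_filter.mp hwl).1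
  have hkeys := pvFinal_keys ws hws
  have hnd : (ws.foldl (fun d kw => d.modify kw 0 (· + 1)) pvSeed).keys.Nodup := by
    rw [hkeys]; exact pvGENRES_nodup
  rw [PySem.Dict.items_eq_map_keys _ hnd 0, hkeys]
  apply List.map_congr_left
  intro k hk
  have hgetD : (ws.foldl (fun d kw => d.modify kw 0 (· + 1)) pvSeed).getD k 0
      = pvSeed.getD k 0 + (ws.count k : Int) :=
    PySem.Dict.getD_foldl_modify_add_one ws pvSeed k
  rw [hgetD, pvSeed_getD k hk, hws_def, pvCount_flatten _ k hk, List.flatMap_def]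
  simp only [zero_add]
  rfl
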